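-- pv_equiv track=rewrite | github.com/kyhyco/raytk | src/components/opDefinition/opDefinition.py | _getTupletName
-- ===== SOURCE A (Python) =====
-- def _getTupletName(parts: 'List[str]'):
-- 	if len(parts) <= 1 or len(parts[0]) <= 1:
-- 		return None
-- 	prefix = parts[0][:-1]
-- 	for part in parts[1:]:
-- 		if not part.startswith(prefix):
-- 			return None
-- 	return prefix
-- ===== SOURCE B (Python) =====
-- def _getTupletName(parts: 'List[str]'):
--     if len(parts) <= 1 or len(parts[0]) <= 1:
--         return None
--     # build the longest common prefix length column-by-column, then compare once
--     lcp_len = 0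
--     for col in zip(*parts):
--         if any(c != col[0] for c in col):
--             break
--         lcp_len += 1
--     if lcp_len >= len(parts[0]) - 1:
--         return parts[0][:-1]
--     return None
-- ===== Notes on version B (the rewrite author's own statement) =====
-- stated objective: alternative
-- what changed: A tests each later string with startswith against parts[0][:-1]; B computes the longest-common-prefix length of all strings by a single column-wise scan (zip(*parts)) and compares it once to len(parts[0]) - 1.
import Mathlib
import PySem

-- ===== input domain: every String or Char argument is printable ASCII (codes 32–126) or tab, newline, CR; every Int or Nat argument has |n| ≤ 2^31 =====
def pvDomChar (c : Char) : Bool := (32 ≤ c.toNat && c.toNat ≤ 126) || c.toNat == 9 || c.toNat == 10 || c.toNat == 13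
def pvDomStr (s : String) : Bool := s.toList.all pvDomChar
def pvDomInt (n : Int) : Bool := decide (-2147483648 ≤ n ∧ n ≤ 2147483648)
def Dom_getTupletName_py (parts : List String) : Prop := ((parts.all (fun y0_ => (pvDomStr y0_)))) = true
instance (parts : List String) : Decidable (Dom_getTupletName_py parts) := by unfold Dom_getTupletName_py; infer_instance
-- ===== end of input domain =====

-- B replaces A's per-string startswith loop by a single column-wise longest-common-prefix scan
-- compared once against len(parts[0]) - 1 (objective: alternative decomposition, same cost).

-- ===== PORT A =====
-- the 'for part in parts[1:]' loop with its early 'return None'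
def getTupletName_loopA (pre : String) : List String → Option String
  | [] => some pre
  | part :: rest =>
      if PySem.Str.startswith part pre then getTupletName_loopA pre rest else none

def getTupletName_py (parts : List String) : Option String :=
  if parts.length ≤ 1 ∨ PySem.Str.len (parts.getD 0 "") ≤ 1 then none
  else
    let pre := PySem.Str.slice (parts.getD 0 "") none (some (-1))   -- parts[0][:-1]
    getTupletName_loopA pre (PySem.List.slice parts (some 1) none)  -- parts[1:]

-- ===== PORT B =====
def getTupletName_py_alt (parts : List String) : Option String :=
  if parts.length ≤ 1 ∨ PySem.Str.len (parts.getD 0 "") ≤ 1 then none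
  else
    let ps := parts.map String.toList
    let p0 := ps.getD 0 []
    -- zip(*parts) yields minLen columns; lcpLen counts them while each column is uniform
    let minLen := (ps.map List.length).foldl Nat.min p0.length
    let lcpLen := ((List.range minLen).takeWhile
                    (fun i => ps.all (fun q => q[i]? == p0[i]?))).length
    if p0.length - 1 ≤ lcpLen then
      some (PySem.Str.slice (parts.getD 0 "") none (some (-1)))     -- parts[0][:-1]
    else none

-- ===== PRECONDITION & SPEC =====
def Spec_getTupletName_py (parts : List String) (out : Option String) : Prop := out = getTupletName_py_alt parts
instance (parts : List String) (out : Option String) : Decidable (Spec_getTupletName_py parts out) := by unfold Spec_getTupletName_py; infer_instance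

-- ===== CLAIM (what is proved, stated in full; the proofs are below) =====
def Claim_equal_getTupletName_py : Prop := ∀ (parts : List String), Dom_getTupletName_py parts → Spec_getTupletName_py parts (getTupletName_py parts)

-- ===== LEMMAS AND PROOFS =====

-- A's loop returns `some pre` iff every remaining part starts with `pre`
lemma loopA_eq (pre : String) (l : List String) :
    getTupletName_loopA pre l =
      (if l.all (fun q => PySem.Str.startswith q pre) then some pre else none) := by
  induction l with
  | nil => simp [getTupletName_loopA]
  | cons a t ih =>
      by_cases h : PySem.Chars.startswith a.toList pre.toList = true <;>
        simp [getTupletName_loopA, List.all_cons, ih, h]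

-- takeWhile length bracket, on an arbitrary list
lemma le_len_takeWhile {α : Type} (p : α → Bool) (l : List α) (k : Nat) :
    k ≤ (l.takeWhile p).length ↔
      k ≤ l.length ∧ ∀ i x, i < k → l[i]? = some x → p x = true := by
  induction l generalizing k with
  | nil =>
      simp only [List.takeWhile_nil, List.length_nil, Nat.le_zero]
      constructor
      · rintro rfl; exact ⟨rfl, by omega⟩
      · rintro ⟨h, -⟩; exact h
  | cons a t ih =>
      cases k with
      | zero => simp
      | succ k =>
          simp only [List.takeWhile_cons]
          by_cases ha : p a
          · simp only [ha, if_true, List.length_cons, Nat.succ_le_succ_iff, ih]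
            constructor
            · rintro ⟨h1, h2⟩
              refine ⟨h1, ?_⟩
              rintro i x hi hx
              cases i with
              | zero => simp at hx; simpa [← hx]
              | succ i => exact h2 i x (by omega) (by simpa using hx)
            · rintro ⟨h1, h2⟩
              refine ⟨h1, ?_⟩
              intro i x hi hx
              exact h2 (i+1) x (by omega) (by simpa using hx)
          · have ha' : p a = false := by simpa using ha
            simp only [ha', Bool.false_eq_true, if_false, List.length_nil, Nat.le_zero]
            constructor
            · omega
            · rintro ⟨-, h2⟩
              have := h2 0 a (by omega) (by simp)
              simp [this] at ha'

lemma le_len_takeWhile_range (f : Nat → Bool) (m k : Nat) :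
    k ≤ ((List.range m).takeWhile f).length ↔ k ≤ m ∧ ∀ i < k, f i = true := by
  rw [le_len_takeWhile]
  simp only [List.length_range]
  constructor
  · rintro ⟨h1, h2⟩
    refine ⟨h1, fun i hi => ?_⟩
    have him : i < m := by omega
    exact h2 i i hi (by simp [him])
  · rintro ⟨h1, h2⟩
    refine ⟨h1, ?_⟩
    intro i x hi hx
    have him : i < m := by omega
    simp [him] at hx
    cases hx
    exact h2 i hi

lemma le_foldl_min (l : List Nat) (a k : Nat) :
    k ≤ l.foldl Nat.min a ↔ k ≤ a ∧ ∀ x ∈ l, k ≤ x := by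
  induction l generalizing a with
  | nil => simp
  | cons b t ih =>
      simp only [List.foldl_cons, ih, List.mem_cons]
      constructor
      · rintro ⟨h1, h2⟩
        have := Nat.le_min.mp h1
        exact ⟨this.1, fun x hx => hx.elim (fun h => h ▸ this.2) (h2 x)⟩
      · rintro ⟨h1, h2⟩
        exact ⟨Nat.le_min.mpr ⟨h1, h2 b (Or.inl rfl)⟩, fun x hx => h2 x (Or.inr hx)⟩

-- prefix characterised pointwise through `getElem?`
lemma take_prefix_iff (p0 q : List Char) (k : Nat) (hk : k ≤ p0.length) :
    p0.take k <+: q ↔ (k ≤ q.length ∧ ∀ i < k, q[i]? = p0[i]?) := by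
  rw [List.prefix_iff_eq_take, List.length_take, Nat.min_eq_left hk]
  constructor
  · intro h
    have hlen : (q.take k).length = (p0.take k).length := by rw [← h]
    simp only [List.length_take, Nat.min_eq_left hk] at hlen
    have hkq : k ≤ q.length := by
      rcases Nat.le_total k q.length with h' | h'
      · exact h'
      · omega
    refine ⟨hkq, ?_⟩
    intro i hi
    have := congrArg (fun l => l[i]?) h.symm
    simpa [List.getElem?_take, hi] using this
  · rintro ⟨hkq, h⟩
    apply List.ext_getElem?
    intro i
    by_cases hi : i < k
    · simpa [hi] using (h i hi).symm
    · simp [List.getElem?_take, hi]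

lemma bcond_iff (p0 : List Char) (rest : List (List Char)) (k : Nat) (hk : k ≤ p0.length) :
    (k ≤ ((List.range (((p0 :: rest).map List.length).foldl Nat.min p0.length)).takeWhile
            (fun i => (p0 :: rest).all (fun q => q[i]? == p0[i]?))).length)
      ↔ ∀ q ∈ rest, p0.take k <+: q := by
  rw [le_len_takeWhile_range, le_foldl_min]
  constructor
  · rintro ⟨⟨-, hlen⟩, hcol⟩
    intro q hq
    rw [take_prefix_iff _ _ _ hk]
    refine ⟨hlen q.length (List.mem_map_of_mem (List.mem_cons_of_mem _ hq)), ?_⟩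
    intro i hi
    have h1 := (List.all_eq_true.mp (hcol i hi)) q (List.mem_cons_of_mem _ hq)
    simpa using h1
  · intro h
    refine ⟨⟨hk, ?_⟩, ?_⟩
    · intro x hx
      rcases List.mem_map.mp hx with ⟨q, hq, rfl⟩
      rcases List.mem_cons.mp hq with rfl | hq'
      · exact hk
      · exact ((take_prefix_iff _ _ _ hk).mp (h q hq')).1
    · intro i hi
      rw [List.all_eq_true]
      intro q hq
      rcases List.mem_cons.mp hq with rfl | hq'
      · simp
      · have := ((take_prefix_iff _ _ _ hk).mp (h q hq')).2 i hi
        simpa using this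

-- ===== VERDICT (by name: the statement is the Claim_ definition above) =====
theorem getTupletName_py_spec : Claim_equal_getTupletName_py := by
  intro parts _
  unfold Spec_getTupletName_py getTupletName_py getTupletName_py_alt
  match parts with
  | [] => rfl
  | [p] => rfl
  | p :: q :: L =>
    by_cases hp : PySem.Str.len p ≤ 1
    · have hg : (p :: q :: L).length ≤ 1 ∨ PySem.Str.len ((p :: q :: L).getD 0 "") ≤ 1 :=
        Or.inr hp
      rw [if_pos hg, if_pos hg]
    · have hg : ¬((p :: q :: L).length ≤ 1 ∨ PySem.Str.len ((p :: q :: L).getD 0 "") ≤ 1) := by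
        simp only [List.length_cons, List.getD_cons_zero]
        omega
      rw [if_neg hg, if_neg hg]
      dsimp only
      rw [List.map_cons, List.getD_cons_zero]
      rw [PySem.List.slice_from_one, List.tail_cons, loopA_eq]
      have hk : p.toList.length - 1 ≤ p.toList.length := Nat.sub_le _ _
      have hpre : (PySem.Str.slice p none (some (-1))).toList =
          p.toList.take (p.toList.length - 1) := by
        rw [PySem.Str.slice_to_neg_one, List.dropLast_eq_take]
      have hiff := bcond_iff p.toList ((q :: L).map String.toList) (p.toList.length - 1) hk
      have hiff' : (((q :: L).all fun s =>
            PySem.Str.startswith s (PySem.Str.slice p none (some (-1)))) = true)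
          ↔ (∀ x ∈ (q :: L).map String.toList,
              p.toList.take (p.toList.length - 1) <+: x) := by
        simp only [List.all_eq_true, PySem.Str.startswith_eq, PySem.Chars.startswith_iff,
          hpre, List.mem_map]
        constructor
        · rintro h x ⟨s, hs, rfl⟩
          exact h s hs
        · intro h s hs
          exact h s.toList ⟨s, hs, rfl⟩
      exact if_congr (hiff'.trans hiff.symm) rfl rfl
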